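-- pv_equiv track=rewrite | github.com/EricDittus/csci127-assignments | hw_07/lady.py | Full
-- ===== SOURCE A (Python) =====
-- def Full(L):
--
--     previous = L[0]
--     consecutive = 1
--     if len(L) == 1:
--         return False
--
--     for i in range(1,len(L)):
--         if L[i] == previous:
--             consecutive += 1
--         elif consecutive > 1:
--             if i == len(L) -1:
--                 return False
--             previous = L[i]
--             consecutive = 1
--         else:
--             return False
--     return True
-- ===== SOURCE B (Python) =====
-- def Full(L):
--     # Every element must have an equal adjacent neighbour, i.e. every maximal
--     # run of equal consecutive elements has length >= 2.
--     n = len(L)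
--     return all(
--         (i > 0 and L[i] == L[i - 1]) or (i + 1 < n and L[i] == L[i + 1])
--         for i in range(n)
--     )
-- ===== Notes on version B (the rewrite author's own statement) =====
-- stated objective: simpler
-- what changed: Replaces the stateful run-counting loop (previous/consecutive, early returns, special last-index branch) with a single stateless comprehension checking that every element equals an adjacent neighbour; Pre_ excludes the empty list, on which A raises IndexError.
import Mathlib
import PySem

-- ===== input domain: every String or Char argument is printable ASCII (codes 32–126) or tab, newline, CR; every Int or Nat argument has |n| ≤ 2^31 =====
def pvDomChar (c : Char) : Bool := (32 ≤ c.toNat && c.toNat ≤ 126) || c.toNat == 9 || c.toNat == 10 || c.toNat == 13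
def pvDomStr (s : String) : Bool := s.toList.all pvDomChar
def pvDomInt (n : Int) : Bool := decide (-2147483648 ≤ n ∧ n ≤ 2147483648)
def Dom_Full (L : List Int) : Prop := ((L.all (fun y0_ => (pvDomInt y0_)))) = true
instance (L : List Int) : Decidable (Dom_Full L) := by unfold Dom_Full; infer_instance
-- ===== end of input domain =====

-- B replaces A's stateful run-counting loop with a stateless "every element has an
-- equal adjacent neighbour" check (objective: simpler); Pre_ excludes the empty list,
-- on which A raises IndexError.


-- ===== PORT A =====
-- the for-loop over range(1, len L) as structural recursion on the remaining
-- elements with the same state (previous, consecutive); `rest = []` is `i == len(L)-1`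
def FullLoop (previous : Int) (consecutive : Int) : List Int → Bool
  | [] => true
  | x :: rest =>
    if x = previous then FullLoop previous (consecutive + 1) rest
    else if consecutive > 1 then
      (if rest = [] then false else FullLoop x 1 rest)
    else false

def Full (L : List Int) : Bool :=
  match L with
  | [] => false          -- Python raises IndexError here (first-element access); excluded by Pre_Full
  | p :: rest => if L.length = 1 then false else FullLoop p 1 rest

-- ===== PORT B =====
-- the per-index condition of Source B's comprehension (all indexing is in range, so getD is exact)
def nbr (L : List Int) (i : Nat) : Bool :=
  (decide (0 < i) && decide (L.getD i 0 = L.getD (i - 1) 0)) ||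
  (decide (i + 1 < L.length) && decide (L.getD i 0 = L.getD (i + 1) 0))

def Full_alt (L : List Int) : Bool := (List.range L.length).all (nbr L)

-- ===== PRECONDITION & SPEC =====
-- A dereferences the first element up front: it raises IndexError exactly on the empty list.
def Pre_Full (L : List Int) : Prop := L ≠ []
instance (L : List Int) : Decidable (Pre_Full L) := by unfold Pre_Full; infer_instance
def pvWitness_Full : List Int := [1, 1, 2, 2]

def Spec_Full (L : List Int) (out : Bool) : Prop := out = Full_alt L
instance (L : List Int) (out : Bool) : Decidable (Spec_Full L out) := by unfold Spec_Full; infer_instance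

-- ===== CLAIM (what is proved, stated in full; the proofs are below) =====
def Claim_equal_Full : Prop := ∀ (L : List Int), Dom_Full L → Pre_Full L → Spec_Full L (Full L)

-- ===== LEMMAS AND PROOFS =====

-- `heq x xs` : head of xs equals x
def heq (x : Int) (xs : List Int) : Bool := decide (xs.head? = some x)

-- structural form of "every element has an equal adjacent neighbour", where the
-- flag b says whether the head equals the (virtual) element before the list
def P (b : Bool) : List Int → Bool
  | [] => true
  | x :: rest => (b || heq x rest) && P (heq x rest) rest

theorem fullLoop_eq_P (xs : List Int) : ∀ (prev : Int),
    (∀ cons : Int, 2 ≤ cons → FullLoop prev cons xs = P (heq prev xs) xs) ∧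
    (xs ≠ [] → FullLoop prev 1 xs = (heq prev xs && P (heq prev xs) xs)) := by
  induction xs with
  | nil => intro prev; exact ⟨fun _ _ => rfl, fun h => absurd rfl h⟩
  | cons x rest ih =>
    intro prev
    constructor
    · intro cons hc
      by_cases hx : x = prev
      · rw [show FullLoop prev cons (x :: rest) = FullLoop prev (cons + 1) rest by
          simp [FullLoop, hx]]
        rw [(ih prev).1 (cons + 1) (by omega)]
        simp [P, heq, hx]
      · rw [show FullLoop prev cons (x :: rest)
            = (if rest = [] then false else FullLoop x 1 rest) by
          simp [FullLoop, hx]; omega]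
        cases rest with
        | nil => simp [heq, P, hx]
        | cons y r2 =>
          rw [if_neg (by simp)]
          rw [(ih x).2 (by simp)]
          simp [P, heq, hx]
    · intro _
      by_cases hx : x = prev
      · rw [show FullLoop prev 1 (x :: rest) = FullLoop prev (1 + 1) rest by
          simp [FullLoop, hx]]
        rw [(ih prev).1 (1 + 1) (by omega)]
        simp [P, heq, hx]
      · rw [show FullLoop prev 1 (x :: rest) = false by simp [FullLoop, hx]]
        simp [P, heq, hx]

theorem nbr_shift (a : Int) (L : List Int) (i : Nat) : nbr (a :: L) (i + 2) = nbr L (i + 1) := by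
  simp [nbr]

theorem alt_shift (xs : List Int) : ∀ (prev : Int),
    (List.range xs.length).all (fun i => nbr (prev :: xs) (i + 1)) = P (heq prev xs) xs := by
  induction xs with
  | nil => intro prev; rfl
  | cons x r ih =>
    intro prev
    have h1 : (List.range (x :: r).length).all (fun i => nbr (prev :: x :: r) (i + 1))
        = (nbr (prev :: x :: r) 1 && (List.range r.length).all (fun i => nbr (prev :: x :: r) (i + 2))) := by
      simp [List.length_cons, List.range_succ_eq_map, List.all_map, Function.comp_def]
    rw [h1]
    have h2 : (List.range r.length).all (fun i => nbr (prev :: x :: r) (i + 2))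
        = (List.range r.length).all (fun i => nbr (x :: r) (i + 1)) := by
      simp [nbr_shift]
    rw [h2, ih x]
    have h3 : nbr (prev :: x :: r) 1 = (decide (x = prev) || heq x r) := by
      cases r with
      | nil => simp [nbr, heq]
      | cons y r2 => simp [nbr, heq, eq_comm]
    simp [h3, P, heq]

theorem alt_eq_P (L : List Int) : Full_alt L = P false L := by
  cases L with
  | nil => rfl
  | cons p rest =>
    have h1 : Full_alt (p :: rest)
        = (nbr (p :: rest) 0 && (List.range rest.length).all (fun i => nbr (p :: rest) (i + 1))) := by
      simp [Full_alt, List.length_cons, List.range_succ_eq_map, List.all_map, Function.comp_def]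
    rw [h1, alt_shift]
    have h0 : nbr (p :: rest) 0 = heq p rest := by
      cases rest with
      | nil => simp [nbr, heq]
      | cons y r2 => simp [nbr, heq, eq_comm]
    simp [h0, P]

-- ===== VERDICT (by name: the statement is the Claim_ definition above) =====
theorem Full_spec : Claim_equal_Full := by
  intro L _ hpre
  unfold Spec_Full
  rw [alt_eq_P]
  cases L with
  | nil => exact absurd rfl hpre
  | cons p rest =>
    cases rest with
    | nil => rfl
    | cons x r2 =>
      have hlen : (p :: x :: r2).length = 1 → False := by simp
      simp only [Full]
      rw [if_neg hlen]
      rw [(fullLoop_eq_P (x :: r2) p).2 (by simp)]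
      simp [P, heq]
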